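-- pv_equiv track=rewrite | github.com/khudeeva/python-tests | utils/math_utils.py | find_repeated_roles
-- ===== SOURCE A (Python) =====
-- def find_repeated_roles(users):
--     seen_only = set()
--     duplicates = set()
--
--     for key, data in users.items():
--         role = data["role"]
--         if data["role"] in seen_only:
--             duplicates.add(role)
--         else:
--             seen_only.add(role)
--
--     return sorted(duplicates)
-- ===== SOURCE B (Python) =====
-- def find_repeated_roles(users):
--     roles = sorted(data["role"] for data in users.values())
--     return _dups(roles)
--
--
-- def _dups(roles):
--     # roles is sorted; peel off the block of copies of the smallest role,
--     # emit it iff the block has more than one element, recurse on the rest.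
--     if not roles:
--         return []
--     head = roles[0]
--     rest = roles[1:]
--     others = [r for r in rest if r != head]
--     if len(rest) > len(others):
--         return [head] + _dups(others)
--     return _dups(others)
-- ===== Notes on version B (the rewrite author's own statement) =====
-- stated objective: alternative
-- what changed: B sorts the role list first and then recursively peels off each block of equal roles, emitting the role when its block has more than one element, so no seen/duplicates sets and no final sort of a set are needed.
import Mathlib
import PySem

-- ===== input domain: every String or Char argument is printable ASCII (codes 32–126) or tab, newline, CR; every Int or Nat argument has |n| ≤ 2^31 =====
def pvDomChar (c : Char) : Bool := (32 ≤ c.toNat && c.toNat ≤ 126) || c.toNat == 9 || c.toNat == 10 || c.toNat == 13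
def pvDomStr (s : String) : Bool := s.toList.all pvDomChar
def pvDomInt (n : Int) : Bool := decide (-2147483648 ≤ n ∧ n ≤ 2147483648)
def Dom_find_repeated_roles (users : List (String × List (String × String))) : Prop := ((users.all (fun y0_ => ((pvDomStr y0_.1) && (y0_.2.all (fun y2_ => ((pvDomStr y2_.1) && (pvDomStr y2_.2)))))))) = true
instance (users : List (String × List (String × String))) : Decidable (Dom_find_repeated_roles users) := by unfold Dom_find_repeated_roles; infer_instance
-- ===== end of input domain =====

-- B sorts the role list first and then recursively peels off each block of equal roles,
-- emitting a role iff its block has more than one copy — no seen/duplicates sets and no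
-- final sort of a set (objective: alternative).

-- ===== PORT A =====
-- A's loop over users.items(): role = data["role"] (Pre_ guarantees the key exists, so getD's
-- default is never read inside Pre_); branch on membership in seen_only; sorted(duplicates).
def find_repeated_roles (users : List (String × List (String × String))) : List String :=
  let st := users.foldl
    (fun (st : PySem.Set String × PySem.Set String) kv =>
      let role := PySem.Dict.getD (PySem.Dict.mk kv.2) "role" ""
      if PySem.Set.contains st.1 role then (st.1, PySem.Set.add st.2 role)
      else (PySem.Set.add st.1 role, st.2))
    (PySem.Set.empty, PySem.Set.empty)
  PySem.List.sorted st.2 (fun x => x) false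

-- ===== PORT B =====
-- _dups: peel the block of copies of the smallest role off the sorted list; roles[1:] is the
-- structural tail; pvOthers is the list comprehension [r for r in rest if r != head].
def pvOthers (head : String) (rest : List String) : List String :=
  rest.filter (fun r => r != head)

-- termination measure for pvDups (cited in its decreasing_by)
lemma pvOthers_le (head : String) (rest : List String) :
    (pvOthers head rest).length ≤ rest.length :=
  List.length_filter_le _ _

def pvDups (roles : List String) : List String :=
  match roles with
  | [] => []
  | head :: rest =>
    if rest.length > (pvOthers head rest).length
    then head :: pvDups (pvOthers head rest)
    else pvDups (pvOthers head rest)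
termination_by roles.length
decreasing_by
  all_goals exact Nat.lt_succ_of_le (pvOthers_le head rest)

-- sorted(data["role"] for data in users.values()), then _dups.
def find_repeated_roles_alt (users : List (String × List (String × String))) : List String :=
  pvDups (PySem.List.sorted
    (users.map (fun kv => PySem.Dict.getD (PySem.Dict.mk kv.2) "role" ""))
    (fun x => x) false)

-- ===== PRECONDITION & SPEC =====
-- Pre_ excludes exactly the inputs where some user dict lacks the key "role": there Python A
-- raises KeyError (and B raises too).
def Pre_find_repeated_roles (users : List (String × List (String × String))) : Prop :=
  (users.all (fun kv => (PySem.Dict.get? (PySem.Dict.mk kv.2) "role").isSome)) = true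
instance (users : List (String × List (String × String))) : Decidable (Pre_find_repeated_roles users) := by unfold Pre_find_repeated_roles; infer_instance

def pvWitness_find_repeated_roles : (List (String × List (String × String))) :=
  [("u", [("role", "admin")]), ("v", [("role", "admin")]), ("w", [("role", "guest")])]

def Spec_find_repeated_roles (users : List (String × List (String × String))) (out : List String) : Prop := out = find_repeated_roles_alt users
instance (users : List (String × List (String × String))) (out : List String) : Decidable (Spec_find_repeated_roles users out) := by unfold Spec_find_repeated_roles; infer_instance

-- ===== CLAIM (what is proved, stated in full; the proofs are below) =====
def Claim_equal_find_repeated_roles : Prop := ∀ (users : List (String × List (String × String))), Dom_find_repeated_roles users → Pre_find_repeated_roles users → Spec_find_repeated_roles users (find_repeated_roles users)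

-- ===== LEMMAS AND PROOFS =====

-- the role each user contributes
def pvRole (kv : String × List (String × String)) : String := PySem.Dict.getD (PySem.Dict.mk kv.2) "role" ""

-- A's loop body on a single role
def pvStepA (st : PySem.Set String × PySem.Set String) (r : String) : PySem.Set String × PySem.Set String :=
  if PySem.Set.contains st.1 r then (st.1, PySem.Set.add st.2 r)
  else (PySem.Set.add st.1 r, st.2)

lemma pvStepA_mem (rs : List String) (s d : List String) (x : String) :
    x ∈ (rs.foldl pvStepA (s, d)).2 ↔ x ∈ d ∨ (x ∈ s ∧ x ∈ rs) ∨ 2 ≤ rs.count x := by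
  induction rs generalizing s d with
  | nil => simp
  | cons r rs ih =>
    simp only [List.foldl_cons, pvStepA]
    by_cases hr : r ∈ s
    · rw [if_pos (by simpa [PySem.Set.contains_iff])]
      rw [ih]
      by_cases hx : x = r
      · subst hx
        by_cases hm : x ∈ rs
        · have h1 : 1 ≤ rs.count x := List.one_le_count_iff.mpr hm
          by_cases hd : x ∈ d <;>
            simp [hd, hm, hr, List.mem_cons]
        · have h0 : rs.count x = 0 := List.count_eq_zero.mpr hm
          by_cases hd : x ∈ d <;>
            simp [hd, hm, hr, List.mem_cons, h0]
      · have hrx : ¬ r = x := fun h => hx h.symm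
        simp [PySem.Set.mem_add, hx, hrx, List.mem_cons]
    · rw [if_neg (by simpa [PySem.Set.contains_iff])]
      rw [ih]
      by_cases hx : x = r
      · subst hx
        by_cases hm : x ∈ rs
        · have h1 : 1 ≤ rs.count x := List.one_le_count_iff.mpr hm
          by_cases hd : x ∈ d <;>
            simp [hd, hm, hr, List.mem_cons]
        · have h0 : rs.count x = 0 := List.count_eq_zero.mpr hm
          by_cases hd : x ∈ d <;>
            simp [hd, hm, hr, List.mem_cons, h0]
      · have hrx : ¬ r = x := fun h => hx h.symm
        simp [PySem.Set.mem_add, hx, hrx, List.mem_cons]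


lemma pvStepA_nodup (rs : List String) (s d : List String) (hd : d.Nodup) :
    ((rs.foldl pvStepA (s, d)).2).Nodup := by
  induction rs generalizing s d with
  | nil => simpa
  | cons r rs ih =>
    simp only [List.foldl_cons, pvStepA]
    split_ifs
    · exact ih _ _ (PySem.Set.nodup_add d r hd)
    · exact ih _ _ hd

lemma pv_count_others_ne (rest : List String) (head x : String) (hx : x ≠ head) :
    (pvOthers head rest).count x = rest.count x := by
  rw [pvOthers, List.count_filter]
  simp [hx]

lemma pv_count_others_self (rest : List String) (head : String) :
    (pvOthers head rest).count head = 0 := by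
  apply List.count_eq_zero.mpr
  intro hmem
  have := (List.mem_filter.mp hmem).2
  simp at this

lemma pv_others_sublist (head : String) (rest : List String) :
    (pvOthers head rest).Sublist rest := List.filter_sublist

lemma pv_others_lt_iff (rest : List String) (head : String) :
    rest.length > (pvOthers head rest).length ↔ head ∈ rest := by
  constructor
  · intro h
    by_contra hc
    have heq : pvOthers head rest = rest := List.filter_eq_self.mpr (by
      intro a ha; simp; intro he; exact hc (he ▸ ha))
    rw [heq] at h
    omega
  · intro hmem
    rcases Nat.lt_or_ge (pvOthers head rest).length rest.length with h | h
    · exact h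
    · exfalso
      have heq : pvOthers head rest = rest := (pv_others_sublist head rest).eq_of_length_le h
      have hh : head ∈ pvOthers head rest := by rw [heq]; exact hmem
      have := (List.mem_filter.mp hh).2
      simp at this

lemma pvDups_mem (s : List String) (x : String) : x ∈ pvDups s ↔ 2 ≤ s.count x := by
  induction s using pvDups.induct with
  | case1 => simp [pvDups]
  | case2 head rest hlt ih =>
    rw [pvDups, if_pos hlt]
    have hmem : head ∈ rest := (pv_others_lt_iff rest head).mp hlt
    by_cases hx : x = head
    · subst hx
      have h1 : 1 ≤ rest.count x := List.one_le_count_iff.mpr hmem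
      simp [ih, pv_count_others_self, List.count_cons_self]
      omega
    · simp only [List.mem_cons, ih, pv_count_others_ne rest head x hx]
      simp [Ne.symm hx, hx]
  | case3 head rest hlt ih =>
    rw [pvDups, if_neg hlt]
    have hmem : head ∉ rest := fun h => hlt ((pv_others_lt_iff rest head).mpr h)
    by_cases hx : x = head
    · subst hx
      have h0 : rest.count x = 0 := List.count_eq_zero.mpr hmem
      rw [ih, List.count_cons_self, pv_count_others_self, h0]
      omega
    · rw [ih, pv_count_others_ne rest head x hx]
      simp [Ne.symm hx]

lemma pvDups_pairwise (s : List String) (hs : s.Pairwise (· ≤ ·)) :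
    (pvDups s).Pairwise (· < ·) := by
  induction s using pvDups.induct with
  | case1 => simp [pvDups]
  | case2 head rest hlt ih =>
    rw [pvDups, if_pos hlt]
    have hrest := List.pairwise_cons.mp hs
    have hoth : (pvOthers head rest).Pairwise (· ≤ ·) :=
      List.Pairwise.sublist (pv_others_sublist head rest) hrest.2
    refine List.pairwise_cons.mpr ⟨?_, ih hoth⟩
    intro y hy
    have hyo : y ∈ pvOthers head rest := by
      have := (pvDups_mem _ y).mp hy
      exact List.one_le_count_iff.mp (by omega)
    have hym := List.mem_filter.mp hyo
    have hne : y ≠ head := by simpa using hym.2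
    exact lt_of_le_of_ne (hrest.1 y hym.1) (Ne.symm hne)
  | case3 head rest hlt ih =>
    rw [pvDups, if_neg hlt]
    have hrest := List.pairwise_cons.mp hs
    exact ih (List.Pairwise.sublist (pv_others_sublist head rest) hrest.2)

-- ===== VERDICT (by name: the statement is the Claim_ definition above) =====
theorem find_repeated_roles_spec : Claim_equal_find_repeated_roles := by
  intro users _ _
  unfold Spec_find_repeated_roles find_repeated_roles find_repeated_roles_alt
  set rs := users.map pvRole with hrs
  have hA : users.foldl
      (fun (st : PySem.Set String × PySem.Set String) kv =>
        let role := PySem.Dict.getD (PySem.Dict.mk kv.2) "role" ""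
        if PySem.Set.contains st.1 role then (st.1, PySem.Set.add st.2 role)
        else (PySem.Set.add st.1 role, st.2))
      (PySem.Set.empty, PySem.Set.empty)
      = rs.foldl pvStepA (PySem.Set.empty, PySem.Set.empty) := by
    rw [hrs, List.foldl_map]; rfl
  have hB : users.map (fun kv => PySem.Dict.getD (PySem.Dict.mk kv.2) "role" "") = rs := rfl
  simp only [hA, hB]
  set srs := PySem.List.sorted rs (fun x => x) false with hsrs
  have hperm : srs.Perm rs := PySem.List.sorted_perm rs (fun x => x) false
  set ys := pvDups srs with hys
  have hypw : ys.Pairwise (· < ·) :=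
    pvDups_pairwise srs (PySem.List.sorted_pairwise rs (fun x => x))
  set D := (rs.foldl pvStepA (PySem.Set.empty, PySem.Set.empty)).2 with hD
  have hmemD : ∀ x, x ∈ D ↔ 2 ≤ rs.count x := by
    intro x
    rw [hD, pvStepA_mem]
    simp [PySem.Set.empty]
  have hmemY : ∀ x, x ∈ ys ↔ 2 ≤ rs.count x := by
    intro x
    rw [hys, pvDups_mem, hperm.count_eq]
  have hpermYD : ys.Perm D := by
    rw [List.perm_ext_iff_of_nodup (hypw.imp ne_of_lt)
      (pvStepA_nodup rs PySem.Set.empty PySem.Set.empty List.nodup_nil)]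
    intro x; rw [hmemY, hmemD]
  exact PySem.List.sorted_eq_of_perm_of_pairwise_lt D ys (fun x => x) hpermYD hypw
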